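-- pv_equiv track=rewrite | github.com/Sira-K/Multiscreen | backend/endpoints/blueprints/docker_management.py | calculate_group_ports
-- ===== SOURCE A (Python) =====
-- from typing import Dict, List, Any, Tuple, Optional
--
-- def calculate_group_ports(group_id: str, groups: Dict[str, Any]) -> Dict[str, int]:
--     """
--     Calculate port assignments for a group based on creation order
--
--     Args:
--         group_id: The group ID
--         groups: Dictionary of all groups
--
--     Returns:
--         Dictionary with port assignments
--     """
--     # Get the group's creation time to determine its index
--     group = groups.get(group_id)
--     if not group:
--         # If group doesn't exist, use index 0
--         group_index = 0
--     else:
--         # Sort groups by creation time to get stable ordering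
--         sorted_groups = sorted(
--             groups.items(),
--             key=lambda x: x[1].get('created_at', 0)
--         )
--
--         # Find this group's position in the creation order
--         group_index = 0
--         for i, (gid, _) in enumerate(sorted_groups):
--             if gid == group_id:
--                 group_index = i
--                 break
--
--     # Base port calculation: each group gets a block of 10 ports
--     base_port_offset = group_index * 10
--
--     return {
--         "rtmp_port": 1935 + base_port_offset,      # 1935, 1945, 1955, etc.
--         "http_port": 1985 + base_port_offset,      # 1985, 1995, 2005, etc.
--         "api_port": 8080 + base_port_offset,       # 8080, 8090, 8100, etc.
--         "srt_port": 10080 + base_port_offset       # 10080, 10090, 10100, etc.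
--     }
-- ===== SOURCE B (Python) =====
-- from typing import Dict, List, Any, Tuple, Optional
--
-- def calculate_group_ports(group_id: str, groups: Dict[str, Any]) -> Dict[str, int]:
--     """Single pass: the group's rank in a stable sort by created_at equals the
--     number of groups with a strictly smaller created_at plus the number of
--     equal-created_at groups that were inserted earlier."""
--     group = groups.get(group_id)
--     if not group:
--         group_index = 0
--     else:
--         my_key = group.get('created_at', 0)
--         group_index = 0
--         seen = False
--         for gid, g in groups.items():
--             if gid == group_id:
--                 seen = True
--             else:
--                 c = g.get('created_at', 0)
--                 if c < my_key or (c == my_key and not seen):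
--                     group_index += 1
--     base_port_offset = group_index * 10
--     return {
--         "rtmp_port": 1935 + base_port_offset,
--         "http_port": 1985 + base_port_offset,
--         "api_port": 8080 + base_port_offset,
--         "srt_port": 10080 + base_port_offset
--     }
-- ===== Notes on version B (the rewrite author's own statement) =====
-- stated objective: alternative
-- what changed: Instead of sorting all groups by created_at and scanning the sorted list for group_id's position, B computes the stable-sort rank in one pass: it counts groups with a strictly smaller created_at plus equal-created_at groups that appear earlier in insertion order; Pre_ only excludes association lists with a duplicated group_id key, which cannot arise from a Python dict.
import Mathlib
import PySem

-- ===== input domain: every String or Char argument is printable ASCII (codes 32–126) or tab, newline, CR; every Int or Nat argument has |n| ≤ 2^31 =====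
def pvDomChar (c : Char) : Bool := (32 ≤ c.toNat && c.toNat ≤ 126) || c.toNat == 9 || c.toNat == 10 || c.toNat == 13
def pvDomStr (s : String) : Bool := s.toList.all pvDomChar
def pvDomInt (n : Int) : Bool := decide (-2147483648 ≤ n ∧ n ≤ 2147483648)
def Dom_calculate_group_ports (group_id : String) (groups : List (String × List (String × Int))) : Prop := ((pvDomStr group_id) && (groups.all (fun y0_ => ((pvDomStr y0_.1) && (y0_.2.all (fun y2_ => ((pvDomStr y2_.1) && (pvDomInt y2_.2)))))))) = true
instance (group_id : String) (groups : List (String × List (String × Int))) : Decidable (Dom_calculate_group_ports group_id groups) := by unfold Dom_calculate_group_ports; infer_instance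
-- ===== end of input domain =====

-- B computes the group's stable-sort rank by a single counting pass instead of sorting and scanning.

-- ===== PORT A =====
-- the sort key 'lambda x: x[1].get("created_at", 0)' (shared by both ports: B reads the same field)
def pvKey (x : String × List (String × Int)) : Int := PySem.Dict.getD ⟨x.2⟩ "created_at" 0

-- the 'for i, (gid, _) in enumerate(sorted_groups): if gid == group_id: group_index = i; break' loop (initial group_index = 0)
def pvFindLoop (group_id : String) : List (Int × (String × List (String × Int))) → Int
  | [] => 0
  | (i, g) :: rest => if g.1 == group_id then i else pvFindLoop group_id rest

def calculate_group_ports (group_id : String) (groups : List (String × List (String × Int))) : List (String × Int) :=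
  let group_index : Int :=
    match PySem.Dict.get? ⟨groups⟩ group_id with
    | none => 0            -- group is None: 'not group' holds
    | some g =>
      if g = [] then 0     -- empty dict is falsy: 'not group' holds
      else
        pvFindLoop group_id (PySem.List.enumerate (PySem.List.sorted groups pvKey))
  let base_port_offset := group_index * 10
  [("rtmp_port", 1935 + base_port_offset),
   ("http_port", 1985 + base_port_offset),
   ("api_port", 8080 + base_port_offset),
   ("srt_port", 10080 + base_port_offset)]

-- ===== PORT B =====
def calculate_group_ports_alt (group_id : String) (groups : List (String × List (String × Int))) : List (String × Int) :=
  let group_index : Int :=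
    match PySem.Dict.get? ⟨groups⟩ group_id with
    | none => 0
    | some g =>
      if g = [] then 0
      else
        let myKey := PySem.Dict.getD ⟨g⟩ "created_at" 0
        (groups.foldl (fun (st : Int × Bool) x =>
            if x.1 == group_id then (st.1, true)
            else if pvKey x < myKey ∨ (pvKey x = myKey ∧ st.2 = false) then (st.1 + 1, st.2)
            else st) ((0 : Int), false)).1
  let base_port_offset := group_index * 10
  [("rtmp_port", 1935 + base_port_offset),
   ("http_port", 1985 + base_port_offset),
   ("api_port", 8080 + base_port_offset),
   ("srt_port", 10080 + base_port_offset)]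

-- ===== PRECONDITION & SPEC =====
-- Pre_ excludes association lists in which the key group_id occurs more than once: a Python dict
-- cannot contain a key twice, so such lists correspond to no Python input.
def Pre_calculate_group_ports (group_id : String) (groups : List (String × List (String × Int))) : Prop :=
  groups.countP (fun x => x.1 == group_id) ≤ 1
instance (group_id : String) (groups : List (String × List (String × Int))) : Decidable (Pre_calculate_group_ports group_id groups) := by unfold Pre_calculate_group_ports; infer_instance

def pvWitness_calculate_group_ports : String × (List (String × List (String × Int))) :=
  ("g", [("g", [("created_at", 2)]), ("h", [("created_at", 1)])])

def Spec_calculate_group_ports (group_id : String) (groups : List (String × List (String × Int))) (out : List (String × Int)) : Prop := out = calculate_group_ports_alt group_id groups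
instance (group_id : String) (groups : List (String × List (String × Int))) (out : List (String × Int)) : Decidable (Spec_calculate_group_ports group_id groups out) := by unfold Spec_calculate_group_ports; infer_instance

-- ===== CLAIM (what is proved, stated in full; the proofs are below) =====
def Claim_equal_calculate_group_ports : Prop := ∀ (group_id : String) (groups : List (String × List (String × Int))), Dom_calculate_group_ports group_id groups → Pre_calculate_group_ports group_id groups → Spec_calculate_group_ports group_id groups (calculate_group_ports group_id groups)

-- ===== LEMMAS AND PROOFS =====

-- insertBy inserts before the first element refusing the test
theorem pv_insertBy_eq {α : Type} (blt : α → α → Bool) (x : α) (l : List α) :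
    PySem.List.insertBy blt x l
      = l.takeWhile (fun y => !blt x y) ++ x :: l.dropWhile (fun y => !blt x y) := by
  induction l with
  | nil => rfl
  | cons y t ih =>
    by_cases h : blt x y
    · simp [PySem.List.insertBy, h]
    · simp only [Bool.not_eq_true] at h
      simp [PySem.List.insertBy, h, ih]

-- on a key-sorted list, the ≤-prefix has length = the ≤-count
theorem pv_takeWhile_len (c : Int) (l : List (String × List (String × Int)))
    (hs : l.Pairwise (fun a b => pvKey a ≤ pvKey b)) :
    (l.takeWhile (fun y => !decide (c < pvKey y))).length
      = l.countP (fun y => decide (pvKey y ≤ c)) := by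
  induction l with
  | nil => rfl
  | cons x t ih =>
    rcases List.pairwise_cons.mp hs with ⟨hx, ht⟩
    by_cases h : pvKey x ≤ c
    · simp [not_lt.mpr h, h, ih ht]
    · rw [List.takeWhile_cons]
      have h1 : (!decide (c < pvKey x)) = false := by simp [lt_of_not_ge h]
      rw [h1]
      have h2 : t.countP (fun y => decide (pvKey y ≤ c)) = 0 := by
        apply List.countP_eq_zero.mpr
        intro y hy
        simp only [decide_eq_true_eq]
        exact fun hc => h (le_trans (hx y hy) hc)
      simp [h, h2]

-- inserting a non-matching element into a decomposed sorted list shifts the prefix by 1 iff its key is smaller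
theorem pv_step (gid : String) (k : Int) (y e : String × List (String × Int)) (a b : List (String × List (String × Int)))
    (hek : pvKey e = k) (hy : (y.1 == gid) = false)
    (ha : ∀ x ∈ a, (x.1 == gid) = false)
    (hs : (a ++ e :: b).Pairwise (fun u v => pvKey u ≤ pvKey v)) :
    ∃ a' b', PySem.List.insertBy (fun u v => decide (pvKey u < pvKey v)) y (a ++ e :: b) = a' ++ e :: b'
      ∧ (∀ x ∈ a', (x.1 == gid) = false)
      ∧ a'.length = a.length + (if pvKey y < k then 1 else 0) := by
  rw [pv_insertBy_eq]
  by_cases hlt : pvKey y < k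
  · -- y's key is smaller: y lands inside the prefix
    have hqe : (!decide (pvKey y < pvKey e)) = false := by simp [hek, hlt]
    have htw : (a ++ e :: b).takeWhile (fun z => !decide (pvKey y < pvKey z))
        = a.takeWhile (fun z => !decide (pvKey y < pvKey z)) := by
      rw [List.takeWhile_append]
      split_ifs with hlen
      · have : a.takeWhile (fun z => !decide (pvKey y < pvKey z)) = a :=
          (List.takeWhile_sublist _).eq_of_length hlen
        rw [this, List.takeWhile_cons, hqe]; simp
      · rfl
    have hdw : (a ++ e :: b).dropWhile (fun z => !decide (pvKey y < pvKey z))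
        = a.dropWhile (fun z => !decide (pvKey y < pvKey z)) ++ e :: b := by
      rw [List.dropWhile_append]
      split_ifs with hemp
      · rw [List.isEmpty_iff.mp hemp, List.dropWhile_cons, hqe]; rfl
      · rfl
    refine ⟨a.takeWhile (fun z => !decide (pvKey y < pvKey z)) ++ y :: a.dropWhile (fun z => !decide (pvKey y < pvKey z)), b, ?_, ?_, ?_⟩
    · rw [htw, hdw]; simp
    · intro x hx
      rcases List.mem_append.mp hx with hx | hx
      · exact ha x ((List.takeWhile_sublist _).mem hx)
      · rcases List.mem_cons.mp hx with rfl | hx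
        · exact hy
        · exact ha x ((List.dropWhile_sublist _).mem hx)
    · have := congrArg List.length (List.takeWhile_append_dropWhile
        (p := fun z => !decide (pvKey y < pvKey z)) (l := a))
      simp only [List.length_append] at this
      simp only [List.length_append, List.length_cons, if_pos hlt]
      omega
  · -- y's key is ≥ k: y lands after e, the prefix is unchanged
    have hak : ∀ x ∈ a, pvKey x ≤ k := by
      intro x hx
      have := (List.pairwise_append.mp hs).2.2 x hx e (List.mem_cons_self)
      simpa [hek] using this
    have hqa : ∀ x ∈ a, (!decide (pvKey y < pvKey x)) = true := by
      intro x hx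
      simp only [Bool.not_eq_true', decide_eq_false_iff_not, not_lt]
      exact le_trans (hak x hx) (not_lt.mp hlt)
    have hqe : (!decide (pvKey y < pvKey e)) = true := by
      simp [hek, not_lt.mp hlt]
    have htwa : a.takeWhile (fun z => !decide (pvKey y < pvKey z)) = a :=
      List.takeWhile_eq_self_iff.mpr hqa
    have hdwa : a.dropWhile (fun z => !decide (pvKey y < pvKey z)) = [] :=
      List.dropWhile_eq_nil_iff.mpr hqa
    have htw : (a ++ e :: b).takeWhile (fun z => !decide (pvKey y < pvKey z))
        = a ++ e :: b.takeWhile (fun z => !decide (pvKey y < pvKey z)) := by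
      rw [List.takeWhile_append, if_pos (by rw [htwa]), List.takeWhile_cons, hqe]; rfl
    have hdw : (a ++ e :: b).dropWhile (fun z => !decide (pvKey y < pvKey z))
        = b.dropWhile (fun z => !decide (pvKey y < pvKey z)) := by
      rw [List.dropWhile_append, if_pos (by rw [hdwa]; rfl), List.dropWhile_cons, hqe]; rfl
    refine ⟨a, (b.takeWhile (fun z => !decide (pvKey y < pvKey z)) ++ y :: b.dropWhile (fun z => !decide (pvKey y < pvKey z))), ?_, ha, ?_⟩
    · rw [htw, hdw]; simp
    · simp [hlt]

-- folding the rest of the insertion sort keeps the decomposition and adds the strictly-smaller count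
theorem pv_main (gid : String) (k : Int) (e : String × List (String × Int))
    (hek : pvKey e = k)
    (v : List (String × List (String × Int))) (hv : ∀ y ∈ v, (y.1 == gid) = false) :
    ∀ (pre a b : List (String × List (String × Int))),
      PySem.List.sorted pre pvKey = a ++ e :: b → (∀ x ∈ a, (x.1 == gid) = false) →
      ∃ a' b', PySem.List.sorted (pre ++ v) pvKey = a' ++ e :: b'
        ∧ (∀ x ∈ a', (x.1 == gid) = false)
        ∧ a'.length = a.length + v.countP (fun y => decide (pvKey y < k)) := by
  induction v with
  | nil => intro pre a b h1 h2; exact ⟨a, b, by simpa using h1, h2, by simp⟩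
  | cons y v' ih =>
    intro pre a b h1 h2
    have hy := hv y (List.mem_cons_self)
    have hv' := fun z hz => hv z (List.mem_cons_of_mem _ hz)
    have hins : PySem.List.sorted (pre ++ [y]) pvKey
        = PySem.List.insertBy (fun u v => decide (pvKey u < pvKey v)) y (PySem.List.sorted pre pvKey) := by
      rw [PySem.List.sorted_eq_foldl_insertBy, PySem.List.sorted_eq_foldl_insertBy pre,
        List.foldl_append]
      rfl
    have hpair : (a ++ e :: b).Pairwise (fun u v => pvKey u ≤ pvKey v) := by
      rw [← h1]; exact PySem.List.sorted_pairwise pre pvKey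
    obtain ⟨a1, b1, hd, hna, hlen⟩ := pv_step gid k y e a b hek hy h2 hpair
    have h1' : PySem.List.sorted (pre ++ [y]) pvKey = a1 ++ e :: b1 := by rw [hins, h1, hd]
    obtain ⟨a', b', hd', hna', hlen'⟩ := ih hv' (pre ++ [y]) a1 b1 h1' hna
    refine ⟨a', b', ?_, hna', ?_⟩
    · rw [← hd', List.append_assoc]; rfl
    · rw [hlen', hlen, List.countP_cons]
      by_cases h : pvKey y < k <;> (simp [h]; try omega)

theorem pv_findLoop (gid : String) (e : String × List (String × Int)) (he : (e.1 == gid) = true) :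
    ∀ (a : List (String × List (String × Int))) (b : List (String × List (String × Int))) (n : Int),
      (∀ x ∈ a, (x.1 == gid) = false) →
      pvFindLoop gid (PySem.List.enumerate (a ++ e :: b) n) = n + a.length := by
  intro a
  induction a with
  | nil => intro b n _; simp [pvFindLoop, he]
  | cons x t ih =>
    intro b n ha
    have hx := ha x (List.mem_cons_self)
    have ht := fun y hy => ha y (List.mem_cons_of_mem _ hy)
    simp only [List.cons_append, PySem.List.enumerate, pvFindLoop, hx, Bool.false_eq_true,
      if_false, ih b (n + 1) ht, List.length_cons]
    push_cast; ring

theorem pv_get?_decomp (gid : String) (g : List (String × Int))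
    (groups : List (String × List (String × Int)))
    (h : PySem.Dict.get? ⟨groups⟩ gid = some g) :
    ∃ u v, groups = u ++ (gid, g) :: v ∧ ∀ x ∈ u, (x.1 == gid) = false := by
  induction groups with
  | nil => simp [PySem.Dict.get?] at h
  | cons x t ih =>
    by_cases hx : (x.1 == gid) = true
    · have hx' : x = (gid, g) := by
        simp only [PySem.Dict.get?, List.find?_cons, hx] at h
        simp only [Option.map_some, Option.some.injEq] at h
        rcases x with ⟨a, b⟩
        simp only at hx h
        simp [eq_of_beq hx, ← h]
      exact ⟨[], t, by rw [hx']; rfl, by simp⟩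
    · have ht : PySem.Dict.get? ⟨t⟩ gid = some g := by
        simp only [PySem.Dict.get?, List.find?_cons, hx] at h ⊢
        simpa using h
      rcases ih ht with ⟨u, v, h1, h2⟩
      exact ⟨x :: u, v, by rw [h1]; rfl, by
        intro y hy
        rcases List.mem_cons.mp hy with rfl | hy
        · simpa using hx
        · exact h2 y hy⟩

theorem pv_B1 (gid : String) (k : Int) :
    ∀ (l : List (String × List (String × Int))), (∀ x ∈ l, (x.1 == gid) = false) → ∀ (n : Int),
      l.foldl (fun (st : Int × Bool) x =>
          if x.1 == gid then (st.1, true)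
          else if pvKey x < k ∨ (pvKey x = k ∧ st.2 = false) then (st.1 + 1, st.2)
          else st) (n, false)
        = (n + (l.countP (fun x => decide (pvKey x ≤ k)) : Int), false) := by
  intro l
  induction l with
  | nil => intro _ n; simp
  | cons x t ih =>
    intro hl n
    have hx := hl x (List.mem_cons_self)
    have ht := fun y hy => hl y (List.mem_cons_of_mem _ hy)
    rw [List.foldl_cons, if_neg (by simp [hx])]
    by_cases h : pvKey x ≤ k
    · have hc : pvKey x < k ∨ (pvKey x = k ∧ false = false) := by
        rcases lt_or_eq_of_le h with h1 | h1
        · exact Or.inl h1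
        · exact Or.inr ⟨h1, rfl⟩
      rw [if_pos hc, ih ht]
      have hcnt : (x :: t).countP (fun x => decide (pvKey x ≤ k))
          = t.countP (fun x => decide (pvKey x ≤ k)) + 1 := by
        rw [List.countP_cons]; simp [h]
      rw [hcnt]
      simp only [Prod.mk.injEq, and_true]
      push_cast; ring
    · have hc : ¬ (pvKey x < k ∨ (pvKey x = k ∧ false = false)) := by
        rintro (h1 | ⟨h1, _⟩); exact h (le_of_lt h1); exact h (le_of_eq h1)
      rw [if_neg hc, ih ht]
      have hcnt : (x :: t).countP (fun x => decide (pvKey x ≤ k))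
          = t.countP (fun x => decide (pvKey x ≤ k)) := by
        rw [List.countP_cons]; simp [h]
      rw [hcnt]

theorem pv_B2 (gid : String) (k : Int) :
    ∀ (l : List (String × List (String × Int))), (∀ x ∈ l, (x.1 == gid) = false) → ∀ (n : Int),
      l.foldl (fun (st : Int × Bool) x =>
          if x.1 == gid then (st.1, true)
          else if pvKey x < k ∨ (pvKey x = k ∧ st.2 = false) then (st.1 + 1, st.2)
          else st) (n, true)
        = (n + (l.countP (fun x => decide (pvKey x < k)) : Int), true) := by
  intro l
  induction l with
  | nil => intro _ n; simp
  | cons x t ih =>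
    intro hl n
    have hx := hl x (List.mem_cons_self)
    have ht := fun y hy => hl y (List.mem_cons_of_mem _ hy)
    rw [List.foldl_cons, if_neg (by simp [hx])]
    by_cases h : pvKey x < k
    · rw [if_pos (Or.inl h), ih ht]
      have hcnt : (x :: t).countP (fun x => decide (pvKey x < k))
          = t.countP (fun x => decide (pvKey x < k)) + 1 := by
        rw [List.countP_cons]; simp [h]
      rw [hcnt]
      simp only [Prod.mk.injEq, and_true]
      push_cast; ring
    · have hc : ¬ (pvKey x < k ∨ (pvKey x = k ∧ true = false)) := by
        rintro (h1 | ⟨_, h2⟩); exact h h1; simp at h2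
      rw [if_neg hc, ih ht]
      have hcnt : (x :: t).countP (fun x => decide (pvKey x < k))
          = t.countP (fun x => decide (pvKey x < k)) := by
        rw [List.countP_cons]; simp [h]
      rw [hcnt]

-- the two index computations agree: A's rank-in-sorted-order is B's counting pass
theorem pv_index_eq (gid : String) (g : List (String × Int))
    (groups : List (String × List (String × Int)))
    (hpre : groups.countP (fun x => x.1 == gid) ≤ 1)
    (hg : PySem.Dict.get? ⟨groups⟩ gid = some g) :
    pvFindLoop gid (PySem.List.enumerate (PySem.List.sorted groups pvKey))
      = (groups.foldl (fun (st : Int × Bool) x =>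
            if x.1 == gid then (st.1, true)
            else if pvKey x < PySem.Dict.getD ⟨g⟩ "created_at" 0
                ∨ (pvKey x = PySem.Dict.getD ⟨g⟩ "created_at" 0 ∧ st.2 = false) then (st.1 + 1, st.2)
            else st) ((0 : Int), false)).1 := by
  have hk : PySem.Dict.getD (⟨g⟩ : PySem.Dict String Int) "created_at" 0 = pvKey (gid, g) := rfl
  rw [hk]
  obtain ⟨u, v, hgroups, hu⟩ := pv_get?_decomp gid g groups hg
  have hv : ∀ x ∈ v, (x.1 == gid) = false := by
    have h0 : v.countP (fun x => x.1 == gid) = 0 := by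
      rw [hgroups] at hpre
      have hcnt : List.countP (fun x => x.1 == gid) (u ++ (gid, g) :: v)
          = u.countP (fun x => x.1 == gid) + (v.countP (fun x => x.1 == gid) + 1) := by
        rw [List.countP_append, List.countP_cons]
        simp
      omega
    intro x hx
    simpa using List.countP_eq_zero.mp h0 x hx
  -- base decomposition: insert (gid, g) into sorted u
  have hins : PySem.List.sorted (u ++ [(gid, g)]) pvKey
      = (PySem.List.sorted u pvKey).takeWhile (fun z => !decide (pvKey (gid, g) < pvKey z))
        ++ (gid, g) :: (PySem.List.sorted u pvKey).dropWhile (fun z => !decide (pvKey (gid, g) < pvKey z)) := by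
    rw [PySem.List.sorted_eq_foldl_insertBy, PySem.List.sorted_eq_foldl_insertBy u,
      List.foldl_append]
    exact pv_insertBy_eq _ _ _
  have hna : ∀ x ∈ (PySem.List.sorted u pvKey).takeWhile (fun z => !decide (pvKey (gid, g) < pvKey z)),
      (x.1 == gid) = false := by
    intro x hx
    exact hu x ((PySem.List.mem_sorted u pvKey false x).mp ((List.takeWhile_sublist _).mem hx))
  have hlen0 : ((PySem.List.sorted u pvKey).takeWhile (fun z => !decide (pvKey (gid, g) < pvKey z))).length
      = u.countP (fun y => decide (pvKey y ≤ pvKey (gid, g))) := by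
    rw [pv_takeWhile_len (pvKey (gid, g)) _ (PySem.List.sorted_pairwise u pvKey)]
    exact List.Perm.countP_congr (PySem.List.sorted_perm u pvKey false) (fun x _ => rfl)
  obtain ⟨a', b', hsorted, hna', hlen'⟩ :=
    pv_main gid (pvKey (gid, g)) (gid, g) rfl v hv (u ++ [(gid, g)]) _ _ hins hna
  have hgs : (u ++ [(gid, g)]) ++ v = groups := by rw [hgroups, List.append_assoc]; rfl
  rw [hgs] at hsorted
  -- A's side
  rw [hsorted, pv_findLoop gid (gid, g) (by simp) a' b' 0 hna']
  -- B's side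
  rw [hgroups, List.foldl_append, pv_B1 gid (pvKey (gid, g)) u hu 0, List.foldl_cons]
  rw [if_pos (by simp)]
  rw [pv_B2 gid (pvKey (gid, g)) v hv]
  rw [hlen', hlen0]
  push_cast
  ring

-- ===== VERDICT (by name: the statement is the Claim_ definition above) =====
theorem calculate_group_ports_spec : Claim_equal_calculate_group_ports := by
  unfold Claim_equal_calculate_group_ports
  intro gid groups _ hpre
  unfold Spec_calculate_group_ports calculate_group_ports calculate_group_ports_alt
  cases hg : PySem.Dict.get? ⟨groups⟩ gid with
  | none => rfl
  | some g =>
    by_cases hnil : g = []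
    · simp [hnil]
    · simp only [if_neg hnil]
      rw [pv_index_eq gid g groups hpre hg]
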